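-- pv_equiv track=rewrite | github.com/tardis-sn/tardis | pkgs/python-dokuwiki-1.3.3-pyhd8ed1ab_0/site-packages/dokuwiki.py | ignore
-- ===== SOURCE A (Python) =====
-- def ignore(content):
--     """Remove dataentry from *content*."""
--     page_content = []
--     start = False
--     for line in content.split('\n'):
--         if line == '----' and not start:
--             start = True
--             continue
--         if start:
--             page_content.append(line)
--     return '\n'.join(page_content) if page_content else content
-- ===== SOURCE B (Python) =====
-- def ignore(content):
--     """Remove dataentry from *content*."""
--     lines = content.split('\n')
--     try:
--         idx = lines.index('----')
--     except ValueError: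
--         return content
--     tail = lines[idx + 1:]
--     return '\n'.join(tail) if tail else content
-- ===== Notes on version B (the rewrite author's own statement) =====
-- stated objective: simpler
-- what changed: Replaces the stateful start-flag accumulation loop with locating the first separator line via list.index (try/except) and slicing the tail.
import Mathlib
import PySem

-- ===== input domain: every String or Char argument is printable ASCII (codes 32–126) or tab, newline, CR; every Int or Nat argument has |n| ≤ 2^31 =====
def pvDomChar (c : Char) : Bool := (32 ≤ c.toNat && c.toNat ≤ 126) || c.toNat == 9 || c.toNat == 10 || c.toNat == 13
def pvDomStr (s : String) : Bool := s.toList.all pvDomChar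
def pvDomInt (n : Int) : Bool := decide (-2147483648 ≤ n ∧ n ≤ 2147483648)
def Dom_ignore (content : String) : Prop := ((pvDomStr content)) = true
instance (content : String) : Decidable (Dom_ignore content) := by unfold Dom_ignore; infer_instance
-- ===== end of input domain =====

-- B replaces A's stateful start-flag loop by locating the first separator line and slicing the tail (simpler decomposition).

-- ===== PORT A =====
def ignoreStep (st : List String × Bool) (line : String) : List String × Bool :=
  if line == "----" && !st.2 then (st.1, true)
  else if st.2 then (st.1 ++ [line], st.2) else st

def ignore (content : String) : String :=
  let lines := (PySem.Str.split? content "\n").getD []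
  let r := lines.foldl ignoreStep ([], false)
  if r.1 = [] then content else PySem.Str.join "\n" r.1

-- ===== PORT B =====
def ignore_alt (content : String) : String :=
  let lines := (PySem.Str.split? content "\n").getD []
  match PySem.List.index? lines "----" with
  | none => content
  | some i =>
    let tail := lines.drop (i + 1)
    if tail = [] then content else PySem.Str.join "\n" tail

-- ===== PRECONDITION & SPEC =====
def Spec_ignore (content : String) (out : String) : Prop := out = ignore_alt content
instance (content : String) (out : String) : Decidable (Spec_ignore content out) := by unfold Spec_ignore; infer_instance

-- ===== CLAIM (what is proved, stated in full; the proofs are below) =====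
def Claim_equal_ignore : Prop := ∀ (content : String), Dom_ignore content → Spec_ignore content (ignore content)

-- ===== LEMMAS AND PROOFS =====

theorem foldl_ignoreStep_true (lines : List String) (acc : List String) :
    List.foldl ignoreStep (acc, true) lines = (acc ++ lines, true) := by
  induction lines generalizing acc with
  | nil => simp
  | cons x xs ih =>
    simp only [List.foldl_cons, ignoreStep]
    simp [ih]

theorem foldl_ignoreStep_false (lines : List String) (acc : List String) :
    List.foldl ignoreStep (acc, false) lines =
      match PySem.List.index? lines "----" with
      | none => (acc, false)
      | some i => (acc ++ lines.drop (i + 1), true) := by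
  induction lines generalizing acc with
  | nil => simp [PySem.List.index?]
  | cons x xs ih =>
    by_cases hx : x = "----"
    · subst hx
      simp only [List.foldl_cons, ignoreStep, PySem.List.index?_cons_self]
      simp [foldl_ignoreStep_true]
    · rw [PySem.List.index?_cons_of_ne xs hx]
      simp only [List.foldl_cons, ignoreStep]
      rw [if_neg (by simp [hx]), if_neg (by simp)]
      rw [ih]
      cases PySem.List.index? xs "----" with
      | none => simp
      | some i => simp [List.drop]

-- ===== VERDICT (by name: the statement is the Claim_ definition above) =====
theorem ignore_spec : Claim_equal_ignore := by
  intro content _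
  unfold Spec_ignore ignore ignore_alt
  simp only [foldl_ignoreStep_false]
  cases h : PySem.List.index? ((PySem.Str.split? content "\n").getD []) "----" with
  | none => simp
  | some i =>
    simp only []
    by_cases ht : ((PySem.Str.split? content "\n").getD []).drop (i + 1) = [] <;> simp [ht]
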